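-- pv_equiv track=rewrite | github.com/RohitPatidar123-hub/Project_Computer_Science | Cryptanalysis_Of_Substitution_Cipher/Mine_Code/decipher_text.py | getLargestWordFromPlaintext
-- ===== SOURCE A (Python) =====
-- def getLargestWordFromPlaintext(wordsOfSemiPlaintext):
--     """
--     Return the largest word (by length) with exactly one hyphen from the list.
--     """
--     size = 0
--     largestWord = ''
--     for w in wordsOfSemiPlaintext:
--         if w.count('-') == 1 and len(w) > size:
--             largestWord = w
--             size = len(w)
--     return largestWord
-- ===== SOURCE B (Python) =====
-- def getLargestWordFromPlaintext(wordsOfSemiPlaintext):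
--     # Index the first qualifying word of each length, then look up the largest length.
--     firstByLen = {}
--     for w in wordsOfSemiPlaintext:
--         if w.count('-') == 1:
--             firstByLen.setdefault(len(w), w)
--     if not firstByLen:
--         return ''
--     return firstByLen[max(firstByLen)]
-- ===== Notes on version B (the rewrite author's own statement) =====
-- stated objective: alternative
-- what changed: Instead of a running (size, best) maximum, B builds a dictionary mapping each length to the first qualifying word of that length, then returns the entry at the maximum key; empty dictionary means ''.
import Mathlib
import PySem

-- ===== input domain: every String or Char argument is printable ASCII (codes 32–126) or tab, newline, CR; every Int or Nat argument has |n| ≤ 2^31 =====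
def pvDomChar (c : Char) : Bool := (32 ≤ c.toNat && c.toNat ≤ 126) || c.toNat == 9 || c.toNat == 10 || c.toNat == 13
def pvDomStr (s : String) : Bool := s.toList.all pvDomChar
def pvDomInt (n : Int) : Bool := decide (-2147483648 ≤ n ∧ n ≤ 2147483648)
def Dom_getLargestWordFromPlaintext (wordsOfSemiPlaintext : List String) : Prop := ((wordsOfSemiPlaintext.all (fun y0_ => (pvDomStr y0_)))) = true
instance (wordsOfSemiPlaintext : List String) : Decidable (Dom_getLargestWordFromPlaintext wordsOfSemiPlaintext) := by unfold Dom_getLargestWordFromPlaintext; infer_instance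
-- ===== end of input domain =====

-- B replaces A's running (size, best) maximum by a length-indexed dictionary (first qualifying word per length)
-- queried at its maximum key: an alternative algorithm of the same cost.

-- ===== PORT A =====
-- literal port of A: one loop carrying the pair (size, largestWord), strict-greater update
def getLargestWordFromPlaintext (wordsOfSemiPlaintext : List String) : String :=
  (wordsOfSemiPlaintext.foldl
    (fun (st : Int × String) w =>
      if PySem.Str.count w "-" = 1 ∧ PySem.Str.len w > st.1 then (PySem.Str.len w, w) else st)
    (0, "")).2

-- ===== PORT B =====
-- literal port of B: build firstByLen via setdefault, then firstByLen[max(firstByLen)] (or '' if empty).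
-- In the nonempty branch max(firstByLen) is some key of the dict, so the 'none' arms and getD's
-- default are unreachable (Python raises nowhere here).
def getLargestWordFromPlaintext_alt (wordsOfSemiPlaintext : List String) : String :=
  let firstByLen : PySem.Dict Int String :=
    wordsOfSemiPlaintext.foldl
      (fun d w => if PySem.Str.count w "-" = 1 then d.setdefault (PySem.Str.len w) w else d)
      PySem.Dict.empty
  if firstByLen.items = [] then ""
  else
    match PySem.List.max? firstByLen.keys (fun k => k) with
    | none => ""
    | some m => firstByLen.getD m ""

-- ===== PRECONDITION & SPEC =====
def Spec_getLargestWordFromPlaintext (wordsOfSemiPlaintext : List String) (out : String) : Prop := out = getLargestWordFromPlaintext_alt wordsOfSemiPlaintext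
instance (wordsOfSemiPlaintext : List String) (out : String) : Decidable (Spec_getLargestWordFromPlaintext wordsOfSemiPlaintext out) := by unfold Spec_getLargestWordFromPlaintext; infer_instance

-- ===== CLAIM (what is proved, stated in full; the proofs are below) =====
def Claim_equal_getLargestWordFromPlaintext : Prop := ∀ (wordsOfSemiPlaintext : List String), Dom_getLargestWordFromPlaintext wordsOfSemiPlaintext → Spec_getLargestWordFromPlaintext wordsOfSemiPlaintext (getLargestWordFromPlaintext wordsOfSemiPlaintext)

-- ===== LEMMAS AND PROOFS =====

-- a word containing exactly one '-' is nonempty, so its length is positive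
lemma pos_len_of_count_one (w : String) (h : PySem.Str.count w "-" = 1) :
    0 < PySem.Str.len w := by
  simp only [PySem.Str.len_eq, PySem.Str.count_eq] at *
  cases hw : w.toList with
  | nil => rw [hw] at h; exact absurd h (by decide)
  | cons a l => simp

-- max(d) over Int keys: if m is in the list and bounds it, max? returns m
lemma max?_id_of_bound (l : List Int) (m : Int) (hm : m ∈ l) (hb : ∀ k ∈ l, k ≤ m) :
    PySem.List.max? l (fun k => k) = some m := by
  cases l with
  | nil => cases hm
  | cons x t =>
    rw [PySem.List.max?_id_cons]
    have h1 := PySem.List.le_foldl_max t x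
    have h2 := PySem.List.foldl_max_mem t x
    have hle : t.foldl max x ≤ m := by
      rcases h2 with h | h
      · rw [h]; exact hb x (List.mem_cons_self)
      · exact hb _ (List.mem_cons_of_mem _ h)
    have hge : m ≤ t.foldl max x := by
      rcases List.mem_cons.mp hm with rfl | h
      · exact h1.1
      · exact h1.2 m h
    exact congrArg some (le_antisymm hle hge)

-- invariant tying A's (size, best) pair to B's dictionary
def pvInv (st : Int × String) (d : PySem.Dict Int String) : Prop :=
  d.keys.Nodup ∧ (∀ k ∈ d.keys, k ≤ st.1) ∧
  ((d.items = [] ∧ st = (0, "")) ∨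
   (st.1 ∈ d.keys ∧ d.getD st.1 "" = st.2 ∧ 0 < st.1))

-- one step of each loop preserves the invariant
lemma pvInv_step (st : Int × String) (d : PySem.Dict Int String) (w : String)
    (h : pvInv st d) :
    pvInv (if PySem.Str.count w "-" = 1 ∧ PySem.Str.len w > st.1 then (PySem.Str.len w, w) else st)
          (if PySem.Str.count w "-" = 1 then d.setdefault (PySem.Str.len w) w else d) := by
  obtain ⟨hnd, hbd, hcase⟩ := h
  by_cases hc : PySem.Str.count w "-" = 1
  · have hpos := pos_len_of_count_one w hc
    rw [if_pos hc]
    by_cases hgt : PySem.Str.len w > st.1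
    · -- new maximum: its length cannot already be a key
      have hnc : d.contains (PySem.Str.len w) = false := by
        by_contra hcon
        have : PySem.Str.len w ∈ d.keys :=
          (PySem.Dict.contains_iff_mem_keys _ _).mp (by simpa using hcon)
        exact absurd (hbd _ this) (by omega)
      rw [if_pos ⟨hc, hgt⟩, PySem.Dict.setdefault_of_not_contains _ _ hnc]
      refine ⟨PySem.Dict.nodup_keys_insert _ _ _ hnd, ?_, Or.inr ?_⟩
      · intro k hk
        rcases (PySem.Dict.mem_keys_insert _ _ _ _).mp hk with rfl | hk
        · exact le_refl _
        · have := hbd k hk; simp only at *; omega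
      · exact ⟨(PySem.Dict.mem_keys_insert _ _ _ _).mpr (Or.inl rfl),
          PySem.Dict.getD_insert_self _ _ _ _, hpos⟩
    · -- not larger: A keeps st; B's setdefault keeps first word per length
      rw [if_neg (by tauto)]
      rcases hcase with ⟨hit, hst⟩ | ⟨hmem, hget, hp⟩
      · -- empty dict forces st.1 = 0 < len w: contradiction with ¬(len w > st.1)
        exfalso; rw [hst] at hgt; exact hgt hpos
      by_cases hcon : d.contains (PySem.Str.len w)
      · rw [PySem.Dict.setdefault_of_contains _ _ hcon]
        exact ⟨hnd, hbd, Or.inr ⟨hmem, hget, hp⟩⟩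
      · have hnc : d.contains (PySem.Str.len w) = false := by simpa using hcon
        rw [PySem.Dict.setdefault_of_not_contains _ _ hnc]
        have hne : PySem.Str.len w ≠ st.1 := by
          intro he
          have ht : d.contains (PySem.Str.len w) = true :=
            (PySem.Dict.contains_iff_mem_keys _ _).mpr (he ▸ hmem)
          rw [ht] at hnc; cases hnc
        refine ⟨PySem.Dict.nodup_keys_insert _ _ _ hnd, ?_, Or.inr ?_⟩
        · intro k hk
          rcases (PySem.Dict.mem_keys_insert _ _ _ _).mp hk with rfl | hk
          · omega
          · exact hbd k hk
        · exact ⟨(PySem.Dict.mem_keys_insert _ _ _ _).mpr (Or.inr hmem),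
            by rw [PySem.Dict.getD_insert_of_ne _ _ _ (Ne.symm hne)]; exact hget, hp⟩
  · rw [if_neg hc, if_neg (by tauto)]
    exact ⟨hnd, hbd, hcase⟩

-- under the invariant, A's fold result equals B's final dictionary query
lemma loop_inv (xs : List String) : ∀ (st : Int × String) (d : PySem.Dict Int String),
    pvInv st d →
    (xs.foldl
      (fun (st : Int × String) w =>
        if PySem.Str.count w "-" = 1 ∧ PySem.Str.len w > st.1 then (PySem.Str.len w, w) else st)
      st).2 =
    (let fd := xs.foldl
        (fun d w => if PySem.Str.count w "-" = 1 then d.setdefault (PySem.Str.len w) w else d) d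
     if fd.items = [] then ""
     else
       match PySem.List.max? fd.keys (fun k => k) with
       | none => ""
       | some m => fd.getD m "") := by
  induction xs with
  | nil =>
    intro st d h
    obtain ⟨_, hbd, hcase⟩ := h
    rcases hcase with ⟨hit, hst⟩ | ⟨hmem, hget, _⟩
    · simp [hit, hst]
    · have hit : d.items ≠ [] := by
        intro he
        have : d.keys = [] := by simp [PySem.Dict.keys, he]
        rw [this] at hmem; cases hmem
      simp only [List.foldl_nil, if_neg hit]
      rw [max?_id_of_bound d.keys st.1 hmem hbd]
      exact hget.symm
  | cons w t ih =>
    intro st d h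
    simp only [List.foldl_cons]
    exact ih _ _ (pvInv_step st d w h)

-- ===== VERDICT (by name: the statement is the Claim_ definition above) =====
theorem getLargestWordFromPlaintext_spec : Claim_equal_getLargestWordFromPlaintext := by
  intro xs _
  show _ = _
  unfold getLargestWordFromPlaintext getLargestWordFromPlaintext_alt
  exact loop_inv xs (0, "") PySem.Dict.empty
    ⟨by simp [PySem.Dict.keys, PySem.Dict.empty], by simp [PySem.Dict.keys, PySem.Dict.empty],
     Or.inl ⟨rfl, rfl⟩⟩
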